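-- pv_equiv track=rewrite | github.com/brookslobe/adventofcode | 2025/03/b.py | shaveExpendableDigits
-- ===== SOURCE A (Python) =====
-- BANK_LENGTH = 12
--
-- def shaveExpendableDigits(s, batteries_remaining):
--
--     if (len(s) < 2 or mustUseRemainingChars(s, batteries_remaining)):
--         # couldn't shave any more based on remaining chars
--         return s
--
--     if s[-2] < s[-1]:
--         s_trimmed = s[:-2] + s[-1] # shave off the second to last digit
--         return shaveExpendableDigits(s_trimmed, batteries_remaining)
--     else:
--         return s
--
-- def mustUseRemainingChars(candidateChunk, lineRemaining):
--     return BANK_LENGTH - len(candidateChunk) == len(lineRemaining)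
-- ===== SOURCE B (Python) =====
-- BANK_LENGTH = 12
--
-- def shaveExpendableDigits(s, batteries_remaining):
--     # One backward scan counting how many pre-last chars are shaveable, then a single slice.
--     n = len(s)
--     limit = BANK_LENGTH - len(batteries_remaining)
--     k = 0
--     while n - k >= 2 and n - k != limit and s[n - 2 - k] < s[-1]:
--         k += 1
--     return s[:n - 1 - k] + s[-1] if k else s
-- ===== Notes on version B (the rewrite author's own statement) =====
-- stated objective: alternative
-- what changed: A rebuilds the string with s[:-2]+s[-1] at every recursive step; B runs one backward scan that only counts how many pre-last characters are shaveable (stopping at the same length/battery limit and digit comparison) and then performs a single slice-and-concat, avoiding the per-step string rebuilds.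
import Mathlib
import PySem

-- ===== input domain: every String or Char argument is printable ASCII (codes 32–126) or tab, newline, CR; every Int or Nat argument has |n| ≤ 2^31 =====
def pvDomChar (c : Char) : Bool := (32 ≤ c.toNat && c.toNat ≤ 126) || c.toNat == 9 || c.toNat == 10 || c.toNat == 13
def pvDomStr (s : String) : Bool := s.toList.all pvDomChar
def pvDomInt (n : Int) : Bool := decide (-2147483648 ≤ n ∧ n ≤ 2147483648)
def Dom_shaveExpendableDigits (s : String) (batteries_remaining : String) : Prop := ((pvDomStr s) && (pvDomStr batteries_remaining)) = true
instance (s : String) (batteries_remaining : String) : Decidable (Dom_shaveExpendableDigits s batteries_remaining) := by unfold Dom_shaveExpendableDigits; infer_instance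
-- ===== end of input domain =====

-- B replaces A's rebuild-the-string tail recursion by one backward counting scan plus a single
-- slice-and-concat (objective: alternative — no per-step string rebuilds).

-- ===== PORT A =====
-- helper: BANK_LENGTH - len(candidateChunk) == len(lineRemaining)
def mustUseRemainingChars (candidateChunk : List Char) (lineRemaining : List Char) : Bool :=
  (12 - (candidateChunk.length : Int)) == (lineRemaining.length : Int)

-- A's recursion, on the character list of s
def shaveAGo (l : List Char) (br : List Char) : List Char :=
  if decide (l.length < 2) || mustUseRemainingChars l br then l
  else
    match PySem.List.pyGet? l (-2), PySem.List.pyGet? l (-1) with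
    | some a, some c =>
      if a < c then shaveAGo (PySem.List.slice l none (some (-2)) ++ [c]) br
      else l
    | _, _ => l  -- unreachable: length ≥ 2 here, so s[-2], s[-1] exist
termination_by l.length
decreasing_by
  simp only [Bool.or_eq_true, decide_eq_true_eq, not_or] at *
  rw [PySem.List.slice_to_neg_ofNat l 2 (by omega)]
  simp only [List.length_append, List.length_take, List.length_singleton]
  omega

def shaveExpendableDigits (s : String) (batteries_remaining : String) : String :=
  String.ofList (shaveAGo s.toList batteries_remaining.toList)

-- ===== PORT B =====
-- the loop condition: n - k >= 2 and n - k != limit and s[n-2-k] < s[-1]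
def altCond (l : List Char) (n limit k : Int) : Bool :=
  decide (2 ≤ n - k) && (n - k != limit) &&
    (match PySem.List.pyGet? l (n - 2 - k), PySem.List.pyGet? l (-1) with
     | some a, some c => decide (a < c)
     | _, _ => false)

-- the while loop: increment k while the condition holds, return the final k
def altK (l : List Char) (n limit k : Int) : Int :=
  if altCond l n limit k then altK l n limit (k + 1) else k
termination_by (n - k).toNat
decreasing_by
  rename_i h
  simp only [altCond, Bool.and_eq_true, decide_eq_true_eq] at h
  omega

def shaveExpendableDigits_alt (s : String) (batteries_remaining : String) : String :=
  let l := s.toList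
  let n : Int := l.length
  let limit : Int := 12 - (batteries_remaining.toList.length : Int)
  let k := altK l n limit 0
  if k = 0 then s
  else String.ofList (PySem.List.slice l none (some (n - 1 - k)) ++
        (match PySem.List.pyGet? l (-1) with | some c => [c] | none => []))

-- ===== PRECONDITION & SPEC =====
def Spec_shaveExpendableDigits (s : String) (batteries_remaining : String) (out : String) : Prop := out = shaveExpendableDigits_alt s batteries_remaining
instance (s : String) (batteries_remaining : String) (out : String) : Decidable (Spec_shaveExpendableDigits s batteries_remaining out) := by unfold Spec_shaveExpendableDigits; infer_instance

-- ===== CLAIM (what is proved, stated in full; the proofs are below) =====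
def Claim_equal_shaveExpendableDigits : Prop := ∀ (s : String) (batteries_remaining : String), Dom_shaveExpendableDigits s batteries_remaining → Spec_shaveExpendableDigits s batteries_remaining (shaveExpendableDigits s batteries_remaining)

-- ===== LEMMAS AND PROOFS =====

theorem altK_ge (l : List Char) (n limit k : Int) : k ≤ altK l n limit k := by
  fun_induction altK with
  | case1 k hc ih => omega
  | case2 k hc => omega

theorem altK_le (l : List Char) (n limit k : Int) :
    altK l n limit k = k ∨ altK l n limit k ≤ n - 1 := by
  fun_induction altK with
  | case1 k hc ih =>
    right
    simp only [altCond, Bool.and_eq_true, decide_eq_true_eq] at hc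
    omega
  | case2 k hc => left; rfl

theorem altCond_shift (l : List Char) (c : Char) (limit : Int) (h2 : 2 ≤ l.length)
    (hc : l.getLast? = some c) (k : Int) (hk : 0 ≤ k) :
    altCond (l.take (l.length - 2) ++ [c]) ((l.length : Int) - 1) limit k
      = altCond l (l.length : Int) limit (k + 1) := by
  unfold altCond
  by_cases hcase : (2:Int) ≤ (l.length:Int) - 1 - k
  · have e1 : ((l.length:Int) - 1 - k) = (l.length:Int) - (k + 1) := by ring
    have e2 : ((l.length:Int) - 1 - 2 - k) = (l.length:Int) - 2 - (k + 1) := by ring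
    rw [e1, e2]
    have hlast' : PySem.List.pyGet? (l.take (l.length - 2) ++ [c]) (-1) = some c :=
      PySem.List.pyGet?_neg_one_append_singleton _ _
    have hlast : PySem.List.pyGet? l (-1) = some c := by
      rw [PySem.List.pyGet?_neg_one]; exact hc
    rw [hlast, hlast']
    have hi0 : (0:Int) ≤ (l.length:Int) - 2 - (k + 1) := by omega
    rw [PySem.List.pyGet?_of_nonneg _ hi0, PySem.List.pyGet?_of_nonneg _ hi0]
    have hlt : ((l.length:Int) - 2 - (k + 1)).toNat < (l.take (l.length - 2)).length := by
      simp only [List.length_take]; omega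
    rw [List.getElem?_append_left hlt]
    have hlt2 : ((l.length:Int) - 2 - (k + 1)).toNat < l.length - 2 := by
      simpa [List.length_take] using hlt
    rw [List.getElem?_take_of_lt hlt2]
  · have e1 : ¬ ((2:Int) ≤ (l.length:Int) - 1 - k) := hcase
    have e2 : ¬ ((2:Int) ≤ (l.length:Int) - (k + 1)) := by omega
    simp [e1, e2]

theorem altK_unfold (l : List Char) (n limit k : Int) :
    altK l n limit k = if altCond l n limit k then altK l n limit (k + 1) else k := by
  conv_lhs => rw [altK]

theorem altK_shift (l : List Char) (c : Char) (limit : Int) (h2 : 2 ≤ l.length)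
    (hc : l.getLast? = some c) : ∀ k : Int, 0 ≤ k →
    altK (l.take (l.length - 2) ++ [c]) ((l.length : Int) - 1) limit k
      = altK l (l.length : Int) limit (k + 1) - 1 := by
  suffices H : ∀ m : Nat, ∀ k : Int, 0 ≤ k → ((l.length : Int) - k).toNat ≤ m →
      altK (l.take (l.length - 2) ++ [c]) ((l.length : Int) - 1) limit k
        = altK l (l.length : Int) limit (k + 1) - 1 by
    intro k hk; exact H ((l.length : Int) - k).toNat k hk le_rfl
  intro m
  induction m with
  | zero =>
    intro k hk hm
    rw [altK_unfold (l.take (l.length - 2) ++ [c]) ((l.length : Int) - 1) limit k,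
        altK_unfold l (l.length : Int) limit (k + 1),
        altCond_shift l c limit h2 hc k hk]
    have cf : altCond l (l.length : Int) limit (k + 1) = false := by
      unfold altCond
      simp [show ¬((2:Int) ≤ (l.length : Int) - (k + 1)) by omega]
    rw [cf]
    simp
  | succ m ih =>
    intro k hk hm
    rw [altK_unfold (l.take (l.length - 2) ++ [c]) ((l.length : Int) - 1) limit k,
        altK_unfold l (l.length : Int) limit (k + 1),
        altCond_shift l c limit h2 hc k hk]
    by_cases hcond : altCond l (l.length : Int) limit (k + 1) = true
    · rw [if_pos hcond, if_pos hcond]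
      have hcc := hcond
      simp only [altCond, Bool.and_eq_true, decide_eq_true_eq] at hcc
      exact ih (k + 1) (by omega) (by omega)
    · rw [if_neg hcond, if_neg hcond]
      omega


theorem mainAux : ∀ (m : Nat) (l br : List Char), l.length ≤ m →
    shaveAGo l br =
      (if altK l (l.length : Int) (12 - (br.length : Int)) 0 = 0 then l
       else PySem.List.slice l none (some ((l.length : Int) - 1 - altK l (l.length : Int) (12 - (br.length : Int)) 0)) ++
            (match PySem.List.pyGet? l (-1) with | some c => [c] | none => [])) := by
  intro m
  induction m with
  | zero =>
    intro l br hl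
    have hnil : l = [] := List.eq_nil_of_length_eq_zero (by omega)
    subst hnil
    conv_lhs => rw [shaveAGo]
    rw [altK_unfold]
    have : altCond [] ((List.length ([] : List Char) : Int)) (12 - (br.length : Int)) 0 = false := by
      unfold altCond
      simp
    rw [this]
    simp
  | succ m ih =>
    intro l br hl
    conv_lhs => rw [shaveAGo]
    by_cases hgate : (decide (l.length < 2) || mustUseRemainingChars l br) = true
    · rw [if_pos hgate]
      have hc0 : altCond l (l.length : Int) (12 - (br.length : Int)) 0 = false := by
        unfold altCond
        simp only [mustUseRemainingChars, Bool.or_eq_true, decide_eq_true_eq, beq_iff_eq] at hgate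
        rcases hgate with h | h <;>
        · simp
          intro hA hB
          exfalso
          omega
      rw [altK_unfold, hc0]
      simp
    · rw [if_neg hgate]
      simp only [mustUseRemainingChars, Bool.or_eq_true, decide_eq_true_eq, beq_iff_eq,
        not_or] at hgate
      obtain ⟨h2', hlim⟩ := hgate
      have h2 : 2 ≤ l.length := by omega
      have hn1 : l ≠ [] := by
        intro h; subst h; simp at h2
      have hc : l.getLast? = some (l.getLast hn1) := List.getLast?_eq_some_getLast hn1
      set c := l.getLast hn1 with hcdef
      have hg1 : PySem.List.pyGet? l (-1) = some c := by
        rw [PySem.List.pyGet?_neg_one]; exact hc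
      have hidx : l.length - 2 < l.length := by omega
      have hg2 : PySem.List.pyGet? l (-2) = some (l[l.length - 2]'hidx) := by
        rw [PySem.List.pyGet?_neg_ofNat l 2 (by norm_num) (by omega)]
        exact List.getElem?_eq_getElem hidx
      set a := l[l.length - 2]'hidx with hadef
      simp only [hg1, hg2]
      have hg3 : PySem.List.pyGet? l ((l.length : Int) - 2 - 0) = some a := by
        rw [PySem.List.pyGet?_of_nonneg _ (by omega)]
        have : (((l.length : Int) - 2 - 0)).toNat = l.length - 2 := by omega
        rw [this]
        exact List.getElem?_eq_getElem hidx
      by_cases hlt : a < c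
      · rw [if_pos hlt]
        -- the gate is open and a shave step happens
        have hcond0 : altCond l (l.length : Int) (12 - (br.length : Int)) 0 = true := by
          unfold altCond
          rw [hg3, hg1]
          simp only [Bool.and_eq_true, decide_eq_true_eq, bne_iff_ne]
          exact ⟨⟨by omega, by omega⟩, by simpa using hlt⟩
        have hK01 : altK l (l.length : Int) (12 - (br.length : Int)) 0
            = altK l (l.length : Int) (12 - (br.length : Int)) 1 := by
          rw [altK_unfold, hcond0]
          norm_num
        have hsl : PySem.List.slice l none (some (-2)) = l.take (l.length - 2) :=
          PySem.List.slice_to_neg_ofNat l 2 (by norm_num)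
        rw [hsl]
        have hlen' : (l.take (l.length - 2) ++ [c]).length = l.length - 1 := by
          simp only [List.length_append, List.length_take, List.length_singleton]
          omega
        rw [ih (l.take (l.length - 2) ++ [c]) br (by omega)]
        have hcast : ((l.take (l.length - 2) ++ [c]).length : Int) = (l.length : Int) - 1 := by
          rw [hlen']; omega
        rw [hcast]
        have hshift := altK_shift l c (12 - (br.length : Int)) h2 hc 0 le_rfl
        norm_num at hshift
        rw [← hK01] at hshift
        rw [hshift]
        have hKge : 1 ≤ altK l (l.length : Int) (12 - (br.length : Int)) 0 := by
          rw [hK01]; exact altK_ge l (l.length : Int) (12 - (br.length : Int)) 1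
        have hKle : altK l (l.length : Int) (12 - (br.length : Int)) 0 = 1
            ∨ altK l (l.length : Int) (12 - (br.length : Int)) 0 ≤ (l.length : Int) - 1 := by
          rw [hK01]
          exact altK_le l (l.length : Int) (12 - (br.length : Int)) 1
        rw [PySem.List.pyGet?_neg_one_append_singleton]
        generalize hKg : altK l (l.length : Int) (12 - (br.length : Int)) 0 = K at hKge hKle ⊢
        by_cases hK1 : K = 1
        · rw [if_pos (by omega), if_neg (by omega)]
          have : PySem.List.slice l none (some ((l.length : Int) - 1 - K))
              = l.take (l.length - 2) := by
            rw [PySem.List.slice_to l (by omega)]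
            congr 1
            omega
          rw [this]
        · have hKn : K ≤ (l.length : Int) - 1 := by rcases hKle with h | h; omega; exact h
          rw [if_neg (by omega), if_neg (by omega)]
          have e1 : (l.length : Int) - 1 - 1 - (K - 1) = (l.length : Int) - 1 - K := by ring
          rw [e1]
          have hm : ((l.length : Int) - 1 - K).toNat ≤ l.length - 2 := by omega
          rw [PySem.List.slice_to _ (by omega), PySem.List.slice_to l (by omega)]
          rw [List.take_append_of_le_length (by simp only [List.length_take]; omega)]
          rw [List.take_take]
          congr 2
          omega
      · rw [if_neg hlt]
        have hc0 : altCond l (l.length : Int) (12 - (br.length : Int)) 0 = false := by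
          unfold altCond
          rw [hg3, hg1]
          simp [hlt]
        rw [altK_unfold, hc0]
        simp

-- A's recursion computes B's count-then-slice result
theorem mainL (l br : List Char) :
    shaveAGo l br =
      (if altK l (l.length : Int) (12 - (br.length : Int)) 0 = 0 then l
       else PySem.List.slice l none (some ((l.length : Int) - 1 - altK l (l.length : Int) (12 - (br.length : Int)) 0)) ++
            (match PySem.List.pyGet? l (-1) with | some c => [c] | none => [])) :=
  mainAux l.length l br le_rfl

-- ===== VERDICT (by name: the statement is the Claim_ definition above) =====
theorem shaveExpendableDigits_spec : Claim_equal_shaveExpendableDigits := by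
  intro s br _
  show String.ofList (shaveAGo s.toList br.toList)
      = (if altK s.toList (s.toList.length : Int) (12 - (br.toList.length : Int)) 0 = 0 then s
         else String.ofList (PySem.List.slice s.toList none (some ((s.toList.length : Int) - 1 - altK s.toList (s.toList.length : Int) (12 - (br.toList.length : Int)) 0)) ++
              (match PySem.List.pyGet? s.toList (-1) with | some c => [c] | none => [])))
  rw [mainL]
  by_cases h : altK s.toList (s.toList.length : Int) (12 - (br.toList.length : Int)) 0 = 0
  · rw [if_pos h, if_pos h]
    exact String.ofList_toList
  · rw [if_neg h, if_neg h]
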